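-- pv_equiv track=rewrite | github.com/schae234/AOC | 2022/python/day5.py | stack_list
-- ===== SOURCE A (Python) =====
-- def stack_list(stack_image):
--     stack_list = [[] for x in range(9)]
--     position = 0
--     for character in stack_image:
--         if character != " " and position in [1, 5, 9, 13, 17, 21, 25, 29, 33]:
--             stack = int((position - 1) / 4)
--             stack_list[stack].insert(0, character)
--         position += 1
--     return(stack_list)
-- ===== SOURCE B (Python) =====
-- def stack_list(stack_image):
--     # Direct indexing: each stack i reads exactly the character at position 4*i+1.
--     return [[stack_image[p]] if p < len(stack_image) and stack_image[p] != " " else []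
--             for p in range(1, 34, 4)]
-- ===== Notes on version B (the rewrite author's own statement) =====
-- stated objective: faster
-- what changed: Instead of scanning every character of the line with a position counter and a membership test against the nine-element position list, B indexes the string directly at the nine fixed positions 1,5,...,33 in one comprehension.
import Mathlib
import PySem

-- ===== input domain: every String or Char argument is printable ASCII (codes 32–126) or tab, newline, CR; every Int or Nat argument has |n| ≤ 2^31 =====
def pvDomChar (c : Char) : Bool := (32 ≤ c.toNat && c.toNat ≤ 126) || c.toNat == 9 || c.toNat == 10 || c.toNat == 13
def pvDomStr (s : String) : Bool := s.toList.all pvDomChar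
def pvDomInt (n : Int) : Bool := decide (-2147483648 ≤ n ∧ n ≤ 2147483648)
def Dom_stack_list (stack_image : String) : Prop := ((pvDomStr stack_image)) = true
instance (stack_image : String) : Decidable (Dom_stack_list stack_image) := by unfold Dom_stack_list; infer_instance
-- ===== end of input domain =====

-- B replaces A's per-character scan (position counter + membership test) by direct
-- indexing at the nine fixed positions 4*i+1 (O(1) instead of a full O(n) line scan); objective: faster.


-- ===== PORT A =====
-- one loop step: 'if character != " " and position in [1,5,...,33]: stack_list[int((position-1)/4)].insert(0, character)'
-- int((position-1)/4): true division then int(); position ≥ 1 in the branch, so it equals floor division.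
-- stack_list[stack] is always in range (0 ≤ stack ≤ 8, list length 9), so set/getD is exact here.
def aStep (acc : List (List String) × Int) (c : Char) : List (List String) × Int :=
  let st := acc.1
  let pos := acc.2
  let st' :=
    if c ≠ ' ' ∧ pos ∈ ([1, 5, 9, 13, 17, 21, 25, 29, 33] : List Int) then
      let stack := (PySem.Int.floordiv (pos - 1) 4).toNat
      st.set stack (String.mk [c] :: st.getD stack [])
    else st
  (st', pos + 1)

def stack_list (stack_image : String) : List (List String) :=
  (stack_image.toList.foldl aStep ((List.range 9).map (fun _ => ([] : List String)), 0)).1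

-- ===== PORT B =====
-- '[[stack_image[p]] if p < len(stack_image) and stack_image[p] != " " else [] for p in range(1, 34, 4)]'
-- pyGet? returns none exactly when p is out of range (p ≥ 1 here), matching the 'p < len' guard.
def stack_list_alt (stack_image : String) : List (List String) :=
  (PySem.List.pyRange 1 34 4).map (fun p =>
    match PySem.List.pyGet? stack_image.toList p with
    | some c => if c ≠ ' ' then [String.mk [c]] else []
    | none => [])

-- ===== PRECONDITION & SPEC =====
def Spec_stack_list (stack_image : String) (out : List (List String)) : Prop := out = stack_list_alt stack_image
instance (stack_image : String) (out : List (List String)) : Decidable (Spec_stack_list stack_image out) := by unfold Spec_stack_list; infer_instance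

-- ===== CLAIM (what is proved, stated in full; the proofs are below) =====
def Claim_equal_stack_list : Prop := ∀ (stack_image : String), Dom_stack_list stack_image → Spec_stack_list stack_image (stack_list stack_image)

-- ===== LEMMAS AND PROOFS =====

-- what stack i receives when the fold starts at position p over the remaining characters cs
def hitChar (cs : List Char) (p : Int) (i : Nat) : List String :=
  if 4 * (i : Int) + 1 < p then []
  else match cs[(4 * (i : Int) + 1 - p).toNat]? with
    | some c => if c = ' ' then [] else [String.mk [c]]
    | none => []

lemma hitChar_shift (c : Char) (rest : List Char) (p : Int) (i : Nat)
    (h : ¬(4 * (i : Int) + 1 = p ∧ c ≠ ' ')) :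
    hitChar (c :: rest) p i = hitChar rest (p + 1) i := by
  unfold hitChar
  rcases lt_trichotomy (4 * (i : Int) + 1) p with hlt | heq | hgt
  · rw [if_pos hlt, if_pos (by omega)]
  · rw [if_neg (by omega), if_pos (by omega)]
    have h0 : (4 * (i : Int) + 1 - p).toNat = 0 := by omega
    have hc : c = ' ' := by
      by_cases hc : c = ' '
      · exact hc
      · exact absurd ⟨heq, hc⟩ h
    rw [h0]
    simp [hc]
  · rw [if_neg (by omega), if_neg (by omega)]
    have h1 : (4 * (i : Int) + 1 - p).toNat = (4 * (i : Int) + 1 - (p + 1)).toNat + 1 := by omega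
    rw [h1, List.getElem?_cons_succ]

lemma mem_positions (p : Int) (hp : p ∈ ([1, 5, 9, 13, 17, 21, 25, 29, 33] : List Int)) :
    ∃ k : Nat, k < 9 ∧ p = 4 * (k : Int) + 1 ∧ (PySem.Int.floordiv (p - 1) 4).toNat = k := by
  simp only [List.mem_cons, List.not_mem_nil, or_false] at hp
  rcases hp with rfl | rfl | rfl | rfl | rfl | rfl | rfl | rfl | rfl
  · exact ⟨0, by omega, by omega, by decide⟩
  · exact ⟨1, by omega, by omega, by decide⟩
  · exact ⟨2, by omega, by omega, by decide⟩
  · exact ⟨3, by omega, by omega, by decide⟩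
  · exact ⟨4, by omega, by omega, by decide⟩
  · exact ⟨5, by omega, by omega, by decide⟩
  · exact ⟨6, by omega, by omega, by decide⟩
  · exact ⟨7, by omega, by omega, by decide⟩
  · exact ⟨8, by omega, by omega, by decide⟩

lemma nat_position_mem (i : Nat) (hi : i < 9) :
    (4 * (i : Int) + 1) ∈ ([1, 5, 9, 13, 17, 21, 25, 29, 33] : List Int) := by
  interval_cases i <;> decide

lemma fold_spec (cs : List Char) (p : Int) (st : List (List String)) (h9 : st.length = 9) :
    (cs.foldl aStep (st, p)).1 =
      (List.range 9).map (fun i => hitChar cs p i ++ st.getD i []) := by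
  induction cs generalizing p st with
  | nil =>
    simp only [List.foldl_nil]
    apply List.ext_getElem
    · simp [h9]
    · intro i h1 h2
      simp only [List.getElem_map, List.getElem_range]
      have hi : i < 9 := by simpa using h2
      have : hitChar [] p i = [] := by
        unfold hitChar
        split <;> simp
      rw [this, List.nil_append, List.getD, List.getElem?_eq_getElem (by omega)]
      rfl
  | cons c rest ih =>
    simp only [List.foldl_cons]
    by_cases hcond : c ≠ ' ' ∧ p ∈ ([1, 5, 9, 13, 17, 21, 25, 29, 33] : List Int)
    · obtain ⟨k, hk9, hpk, hfl⟩ := mem_positions p hcond.2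
      have hstep : aStep (st, p) c =
          (st.set k (String.mk [c] :: st.getD k []), p + 1) := by
        simp only [aStep, if_pos hcond, hfl]
      rw [hstep, ih _ _ (by simp [h9])]
      apply List.map_congr_left
      intro i hi
      have hi9 : i < 9 := List.mem_range.mp hi
      by_cases hik : i = k
      · subst hik
        have hset : (st.set i (String.mk [c] :: st.getD i [])).getD i [] =
            String.mk [c] :: st.getD i [] := by
          rw [List.getD, List.getElem?_set_self (by omega)]
          rfl
        have hL : hitChar rest (p + 1) i = [] := by
          unfold hitChar
          rw [if_pos (by omega)]
        have hR : hitChar (c :: rest) p i = [String.mk [c]] := by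
          unfold hitChar
          rw [if_neg (by omega)]
          have h0 : (4 * (i : Int) + 1 - p).toNat = 0 := by omega
          rw [h0]
          simp [hcond.1]
        rw [hset, hL, hR]
        simp
      · have hset : (st.set k (String.mk [c] :: st.getD k [])).getD i [] = st.getD i [] := by
          rw [List.getD, List.getElem?_set_ne (by omega), List.getD]
        rw [hset, hitChar_shift c rest p i (by
          rintro ⟨heq, -⟩
          exact hik (by omega))]
    · have hstep : aStep (st, p) c = (st, p + 1) := by
        simp only [aStep, if_neg hcond]
      rw [hstep, ih _ _ h9]
      apply List.map_congr_left
      intro i hi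
      have hi9 : i < 9 := List.mem_range.mp hi
      rw [hitChar_shift c rest p i (by
        rintro ⟨heq, hc⟩
        exact hcond ⟨hc, heq ▸ nat_position_mem i hi9⟩)]

lemma alt_eq_hit (s : String) :
    stack_list_alt s = (List.range 9).map (fun i => hitChar s.toList 0 i) := by
  unfold stack_list_alt
  have hr : PySem.List.pyRange 1 34 4 = [1, 5, 9, 13, 17, 21, 25, 29, 33] := by decide
  rw [hr]
  have hpt : ∀ i : Nat, i < 9 →
      (match PySem.List.pyGet? s.toList (4 * (i : Int) + 1) with
        | some c => if c ≠ ' ' then [String.mk [c]] else []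
        | none => []) = hitChar s.toList 0 i := by
    intro i hi
    unfold hitChar
    rw [if_neg (by omega)]
    have : (4 * (i : Int) + 1 - 0).toNat = 4 * i + 1 := by omega
    rw [this, PySem.List.pyGet?_of_nonneg _ (by omega)]
    have h2 : (4 * (i : Int) + 1).toNat = 4 * i + 1 := by omega
    rw [h2]
    cases s.toList[4 * i + 1]? with
    | none => rfl
    | some c =>
      by_cases hc : c = ' ' <;> simp [hc]
  have : ([1, 5, 9, 13, 17, 21, 25, 29, 33] : List Int) =
      (List.range 9).map (fun (i : Nat) => 4 * (i : Int) + 1) := by decide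
  rw [this, List.map_map]
  apply List.map_congr_left
  intro i hi
  exact hpt i (List.mem_range.mp hi)

-- ===== VERDICT (by name: the statement is the Claim_ definition above) =====
theorem stack_list_spec : Claim_equal_stack_list := by
  intro s _
  unfold Spec_stack_list stack_list
  rw [fold_spec _ _ _ (by simp), alt_eq_hit]
  apply List.map_congr_left
  intro i hi
  have hi9 : i < 9 := List.mem_range.mp hi
  rw [List.getD, List.getElem?_map, List.getElem?_range hi9]
  simp
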